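-- pv_equiv track=rewrite | github.com/mtcorread/pdf-table-extractor | core/manual_input.py | _merge_tables_horizontally
-- ===== SOURCE A (Python) =====
-- def _merge_tables_horizontally(tables):
--     """
--     Merge multiple tables by appending them horizontally.
--
--     Args:
--         tables: A list of table data (each table is a 2D list)
--
--     Returns:
--         list: The merged table data
--     """
--     if not tables:
--         return []
--
--     # Find the maximum row count across all tables
--     max_rows = max(len(table) for table in tables)
--
--     # Pad tables to have the same number of rows
--     padded_tables = []
--     for table in tables:
--         # Ensure all rows in the table have the same length
--         cols = max(len(row) for row in table) if table else 0
--         padded_table = [row + [''] * (cols - len(row)) for row in table]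
--
--         # Pad the table to have max_rows rows
--         padded_table.extend([[''] * cols for _ in range(max_rows - len(padded_table))])
--         padded_tables.append(padded_table)
--
--     # Merge the padded tables horizontally
--     merged = []
--     for row_idx in range(max_rows):
--         merged_row = []
--         for table in padded_tables:
--             merged_row.extend(table[row_idx])
--         merged.append(merged_row)
--
--     return merged
-- ===== SOURCE B (Python) =====
-- def _merge_tables_horizontally(tables):
--     # Incremental horizontal stacking: fold each table into the merged result,
--     # reconciling row counts on the fly; no global max_rows pass, no padded_tables list.
--     merged = []   # merged rows so far (all of length `width`)
--     width = 0     # total width of the merged rows so far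
--     for t in tables:
--         w = max(len(row) for row in t) if t else 0
--         rows = [r + [''] * (w - len(r)) for r in t]
--         if len(rows) < len(merged):
--             rows += [[''] * w for _ in range(len(merged) - len(rows))]
--         elif len(merged) < len(rows):
--             merged += [[''] * width for _ in range(len(rows) - len(merged))]
--         merged = [a + b for a, b in zip(merged, rows)]
--         width += w
--     return merged
-- ===== Notes on version B (the rewrite author's own statement) =====
-- stated objective: alternative
-- what changed: B replaces A's two-phase scheme (global max_rows pass, materialised padded_tables list, then row-index merge loop) with a single left fold over the tables: each table is stacked onto the accumulated merged rows, reconciling heights incrementally against the running total width, so no global row count or padded-table list is ever computed; it trades this for re-copying the merged rows at each step.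
import Mathlib
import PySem

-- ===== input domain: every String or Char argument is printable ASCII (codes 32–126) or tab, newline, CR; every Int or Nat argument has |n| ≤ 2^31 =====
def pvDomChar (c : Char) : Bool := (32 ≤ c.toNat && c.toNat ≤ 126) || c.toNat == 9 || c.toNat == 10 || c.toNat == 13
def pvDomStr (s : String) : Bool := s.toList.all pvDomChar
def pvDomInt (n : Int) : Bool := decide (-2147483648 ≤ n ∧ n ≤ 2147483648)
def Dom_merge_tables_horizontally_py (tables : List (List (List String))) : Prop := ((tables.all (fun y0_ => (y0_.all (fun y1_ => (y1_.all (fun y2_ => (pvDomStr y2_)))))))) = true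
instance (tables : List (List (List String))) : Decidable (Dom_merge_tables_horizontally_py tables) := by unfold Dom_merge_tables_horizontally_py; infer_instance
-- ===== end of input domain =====

-- B folds the tables left-to-right, stacking each onto the accumulated merged rows and
-- reconciling heights incrementally; no global max_rows pass, no padded_tables list
-- (objective: alternative decomposition, same output).

-- ===== PORT A =====
-- `max(len(row) for row in table) if table else 0` (used verbatim by both Pythons)
def pvWidth (table : List (List String)) : Nat :=
  if table = [] then 0 else (table.map List.length).max?.getD 0

-- one iteration of A's padding loop: pad all rows to `cols`, then extend to `max_rows` rows
def pvPadTable (max_rows : Nat) (table : List (List String)) : List (List String) :=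
  let cols := pvWidth table
  let padded_table := table.map (fun row => row ++ List.replicate (cols - row.length) "")
  padded_table ++ (List.range (max_rows - padded_table.length)).map (fun _ => List.replicate cols "")

def merge_tables_horizontally_py (tables : List (List (List String))) : List (List String) :=
  if tables = [] then []
  else
    let max_rows := (tables.map List.length).max?.getD 0
    let padded_tables := tables.map (pvPadTable max_rows)
    -- `table[row_idx]` is always in range here (every padded table has max_rows rows)
    (List.range max_rows).map (fun row_idx =>
      padded_tables.foldl (fun merged_row table => merged_row ++ table.getD row_idx []) [])

-- ===== PORT B =====
-- one iteration of B's loop body: state = (merged rows so far, their common width)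
def pvStep (acc : List (List String) × Nat) (t : List (List String)) :
    List (List String) × Nat :=
  let w := pvWidth t
  let rows := t.map (fun r => r ++ List.replicate (w - r.length) "")
  let rows :=
    if rows.length < acc.1.length then
      rows ++ (List.range (acc.1.length - rows.length)).map (fun _ => List.replicate w "")
    else rows
  let merged :=
    if acc.1.length < rows.length then
      acc.1 ++ (List.range (rows.length - acc.1.length)).map (fun _ => List.replicate acc.2 "")
    else acc.1
  ((merged.zip rows).map (fun p => p.1 ++ p.2), acc.2 + w)

def merge_tables_horizontally_py_alt (tables : List (List (List String))) : List (List String) :=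
  (tables.foldl pvStep ([], 0)).1

-- ===== PRECONDITION & SPEC =====
def Spec_merge_tables_horizontally_py (tables : List (List (List String))) (out : List (List String)) : Prop := out = merge_tables_horizontally_py_alt tables
instance (tables : List (List (List String))) (out : List (List String)) : Decidable (Spec_merge_tables_horizontally_py tables out) := by unfold Spec_merge_tables_horizontally_py; infer_instance

-- ===== CLAIM (what is proved, stated in full; the proofs are below) =====
def Claim_equal_merge_tables_horizontally_py : Prop := ∀ (tables : List (List (List String))), Dom_merge_tables_horizontally_py tables → Spec_merge_tables_horizontally_py tables (merge_tables_horizontally_py tables)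


-- ===== LEMMAS AND PROOFS =====

-- row i contributed by table t after padding (shared characterisation of both ports)
def pvSlice (i : Nat) (t : List (List String)) : List String :=
  match t[i]? with
  | some row => row ++ List.replicate (pvWidth t - row.length) ""
  | none => List.replicate (pvWidth t) ""

def pvMaxh (l : List (List (List String))) : Nat := (l.map List.length).max?.getD 0

def pvW (l : List (List (List String))) : Nat := (l.map pvWidth).sum

-- canonical form both ports are reduced to: row i is the concatenation of every table's slice
def pvCanon (l : List (List (List String))) : List (List String) :=
  (List.range (pvMaxh l)).map (fun i => l.flatMap (pvSlice i))

theorem le_maxD (xs : List Nat) (a : Nat) (h : a ∈ xs) : a ≤ xs.max?.getD 0 := by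
  cases hm : xs.max? with
  | none => rw [List.max?_eq_none_iff] at hm; subst hm; cases h
  | some m =>
    obtain ⟨_, hb⟩ := List.max?_eq_some_iff.mp hm
    simpa using hb a h

theorem maxD_append (xs : List Nat) (a : Nat) :
    ((xs ++ [a]).max?).getD 0 = max (xs.max?.getD 0) a := by
  induction xs with
  | nil => simp
  | cons b xs ih =>
    rw [List.cons_append, List.max?_cons, List.max?_cons]
    cases h : (xs ++ [a]).max? with
    | none => simp [List.max?_eq_none_iff] at h
    | some m =>
      cases h2 : xs.max? with
      | none =>
        rw [List.max?_eq_none_iff] at h2; subst h2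
        simp at h; subst h; simp
      | some k =>
        have := ih
        rw [h, h2] at this; simp at this
        simp [← this, Nat.max_assoc]

theorem pvMaxh_ge (l : List (List (List String))) (t : List (List String)) (h : t ∈ l) :
    t.length ≤ pvMaxh l :=
  le_maxD _ _ (List.mem_map_of_mem h)

theorem pvMaxh_append (l : List (List (List String))) (t : List (List String)) :
    pvMaxh (l ++ [t]) = max (pvMaxh l) t.length := by
  unfold pvMaxh
  rw [List.map_append]
  simpa using maxD_append (l.map List.length) t.length

theorem pvW_append (l : List (List (List String))) (t : List (List String)) :
    pvW (l ++ [t]) = pvW l + pvWidth t := by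
  simp [pvW]

theorem pvSlice_of_ge (i : Nat) (t : List (List String)) (h : t.length ≤ i) :
    pvSlice i t = List.replicate (pvWidth t) "" := by
  unfold pvSlice
  rw [List.getElem?_eq_none h]

theorem flatMap_slice_of_ge (i : Nat) (l : List (List (List String)))
    (h : ∀ t ∈ l, t.length ≤ i) :
    l.flatMap (pvSlice i) = List.replicate (pvW l) "" := by
  induction l with
  | nil => simp [pvW]
  | cons a l ih =>
    rw [List.flatMap_cons, pvSlice_of_ge i a (h a List.mem_cons_self),
        ih (fun t ht => h t (List.mem_cons_of_mem _ ht))]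
    have : pvW (a :: l) = pvWidth a + pvW l := by simp [pvW]
    rw [this, List.replicate_add]

-- padding every row of t is the same as slicing t at each index below its height
theorem map_pad_eq_range (t : List (List String)) :
    t.map (fun r => r ++ List.replicate (pvWidth t - r.length) "") =
      (List.range t.length).map (fun i => pvSlice i t) := by
  apply List.ext_getElem (by simp)
  intro i h1 h2
  simp only [List.getElem_map, List.getElem_range]
  unfold pvSlice
  have hi : i < t.length := by simpa using h1
  rw [List.getElem?_eq_getElem hi]

-- extend a mapped range with a constant tail, when F is that constant past n
theorem range_map_extend (n m : Nat) (hnm : n ≤ m) (F : Nat → List String)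
    (c : List String) (hc : ∀ i, n ≤ i → F i = c) :
    (List.range n).map F ++ (List.range (m - n)).map (fun _ => c) =
      (List.range m).map F := by
  conv_rhs => rw [show m = n + (m - n) by omega]
  rw [List.range_add, List.map_append, List.map_map]
  congr 1
  apply List.map_congr_left
  intro j _
  exact (hc (n + j) (by omega)).symm

-- B's per-table contribution equals indexing A's padded table, for row indices below max_rows
theorem pvPad_getD (t : List (List String)) (mr i : Nat) (hi : i < mr) :
    (pvPadTable mr t).getD i [] = pvSlice i t := by
  unfold pvPadTable pvSlice
  by_cases h : i < t.length
  · have h' : i < (t.map (fun row => row ++ List.replicate (pvWidth t - row.length) "")).length := by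
      simpa using h
    rw [List.getD_eq_getElem?_getD, List.getElem?_append_left h']
    simp [h]
  · have hle : t.length <= i := Nat.le_of_not_lt h
    have hlen : (t.map (fun row => row ++ List.replicate (pvWidth t - row.length) "")).length = t.length := by simp
    rw [List.getD_eq_getElem?_getD, List.getElem?_append_right (by omega)]
    have hj : i - (t.map (fun row => row ++ List.replicate (pvWidth t - row.length) "")).length < mr - t.length := by
      rw [hlen]; omega
    rw [List.getElem?_map, List.getElem?_range (by simpa [hlen] using hj)]
    have : t[i]? = none := by simp; omega
    simp [this]

theorem A_eq_canon (tables : List (List (List String))) :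
    merge_tables_horizontally_py tables = pvCanon tables := by
  unfold merge_tables_horizontally_py pvCanon pvMaxh
  by_cases hnil : tables = []
  · simp [hnil]
  · simp only [if_neg hnil]
    apply List.map_congr_left
    intro i hi
    have hi' : i < (tables.map List.length).max?.getD 0 := List.mem_range.mp hi
    rw [PySem.List.foldl_append_eq_flatMap, List.nil_append, List.flatMap_map]
    apply List.flatMap_congr
    intro t _
    exact pvPad_getD t _ i hi'

-- one fold step of B preserves the canonical form
theorem pvStep_canon (l : List (List (List String))) (t : List (List String)) :
    pvStep (pvCanon l, pvW l) t = (pvCanon (l ++ [t]), pvW (l ++ [t])) := by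
  have hclen : (pvCanon l).length = pvMaxh l := by simp [pvCanon]
  have hslice : ∀ i, t.length ≤ i → pvSlice i t = List.replicate (pvWidth t) "" :=
    fun i h => pvSlice_of_ge i t h
  have hflat : ∀ i, pvMaxh l ≤ i →
      l.flatMap (pvSlice i) = List.replicate (pvW l) "" :=
    fun i h => flatMap_slice_of_ge i l (fun u hu => le_trans (pvMaxh_ge l u hu) h)
  have hc : pvCanon (l ++ [t]) =
      (List.range (max (pvMaxh l) t.length)).map
        (fun i => l.flatMap (pvSlice i) ++ pvSlice i t) := by
    unfold pvCanon
    rw [pvMaxh_append]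
    apply List.map_congr_left
    intro i _
    simp [List.flatMap_append, pvSlice]
  unfold pvStep
  rw [hc, pvW_append]
  simp only [map_pad_eq_range t, hclen, List.length_map, List.length_range]
  by_cases h1 : t.length < pvMaxh l
  · -- table shorter than accumulator: B extends rows
    simp only [if_pos h1, List.length_append, List.length_map, List.length_range]
    rw [if_neg (by omega)]
    have hcl : pvCanon l = (List.range (pvMaxh l)).map (fun i => l.flatMap (pvSlice i)) := rfl
    rw [range_map_extend t.length (pvMaxh l) (le_of_lt h1) _ _ hslice,
        hcl, List.zip_map', List.map_map]
    have hmax : max (pvMaxh l) t.length = pvMaxh l := by omega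
    rw [hmax]
    simp [Function.comp]
  · simp only [if_neg h1, List.length_map, List.length_range]
    by_cases h2 : pvMaxh l < t.length
    · -- table taller: B extends the accumulator
      rw [if_pos h2]
      have : pvCanon l = (List.range (pvMaxh l)).map (fun i => l.flatMap (pvSlice i)) := rfl
      rw [this,
          range_map_extend (pvMaxh l) t.length (le_of_lt h2) _ _ hflat,
          List.zip_map', List.map_map]
      have hmax : max (pvMaxh l) t.length = t.length := by omega
      rw [hmax]
      simp [Function.comp]
    · -- equal heights
      rw [if_neg h2]
      have heq : pvMaxh l = t.length := by omega
      have : pvCanon l = (List.range (pvMaxh l)).map (fun i => l.flatMap (pvSlice i)) := rfl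
      rw [this, heq, List.zip_map', List.map_map]
      have hmax : max t.length t.length = t.length := by omega
      rw [hmax]
      simp [Function.comp]

theorem B_eq_canon (tables : List (List (List String))) :
    tables.foldl pvStep ([], 0) = (pvCanon tables, pvW tables) := by
  induction tables using List.reverseRecOn with
  | nil => simp [pvCanon, pvMaxh, pvW]
  | append_singleton l t ih =>
    rw [List.foldl_append, ih, List.foldl_cons, List.foldl_nil, pvStep_canon]

-- ===== VERDICT (by name: the statement is the Claim_ definition above) =====
theorem merge_tables_horizontally_py_spec : Claim_equal_merge_tables_horizontally_py := by
  intro tables _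
  unfold Spec_merge_tables_horizontally_py merge_tables_horizontally_py_alt
  rw [A_eq_canon, B_eq_canon]
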